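-- pv_equiv track=rewrite | github.com/RubenBoone/AdventOfCode2021 | day3/part2.py | makeArraySmallerPriorityOne
-- ===== SOURCE A (Python) =====
-- def makeArraySmallerPriorityOne(i, newArray):
--     ones = []
--     zeros = []
--     one = 0
--     zero = 0
--
--     for item in newArray:
--         if item[i] == "1":
--             one += 1
--             ones.append(item)
--         else:
--             zero += 1
--             zeros.append(item)
--
--     if one < zero:
--         return ones
--     else:
--         return zeros
-- ===== SOURCE B (Python) =====
-- def makeArraySmallerPriorityOne(i, newArray):
--     ones = sum(1 for item in newArray if item[i] == "1")
--     keep_ones = ones < len(newArray) - ones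
--     return [item for item in newArray if (item[i] == "1") == keep_ones]
-- ===== Notes on version B (the rewrite author's own statement) =====
-- stated objective: simpler
-- what changed: B replaces A's dual-list partition pass (building both kept and discarded groups plus two counters) with a counting pass (zeros derived as len - ones) followed by an order-preserving filter that never materialises the discarded group.
import Mathlib
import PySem

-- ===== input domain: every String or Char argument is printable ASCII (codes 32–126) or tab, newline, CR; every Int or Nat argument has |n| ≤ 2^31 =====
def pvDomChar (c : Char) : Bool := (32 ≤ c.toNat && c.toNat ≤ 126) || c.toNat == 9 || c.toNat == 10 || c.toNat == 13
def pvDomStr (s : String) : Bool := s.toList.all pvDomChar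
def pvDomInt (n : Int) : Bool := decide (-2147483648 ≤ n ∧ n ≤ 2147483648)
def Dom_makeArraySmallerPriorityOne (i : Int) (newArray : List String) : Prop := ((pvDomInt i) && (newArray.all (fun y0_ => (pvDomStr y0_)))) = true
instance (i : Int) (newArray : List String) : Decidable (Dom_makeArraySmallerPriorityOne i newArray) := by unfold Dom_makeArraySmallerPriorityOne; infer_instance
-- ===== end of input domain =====

-- B replaces A's dual-list partition pass with a counting pass plus an order-preserving filter (simpler; same asymptotic cost).


-- ===== PORT A =====
-- literal transliteration of A: one pass appending each item to ones or zeros and counting, then pick the strictly smaller-by-count ones list else zeros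
def makeArraySmallerPriorityOne (i : Int) (newArray : List String) : List String :=
  let st := newArray.foldl
    (fun (st : List String × List String × Int × Int) item =>
      if PySem.Str.pyGet? item i = some '1' then
        (st.1 ++ [item], st.2.1, st.2.2.1 + 1, st.2.2.2)
      else
        (st.1, st.2.1 ++ [item], st.2.2.1, st.2.2.2 + 1))
    ([], [], 0, 0)
  if st.2.2.1 < st.2.2.2 then st.1 else st.2.1

-- ===== PORT B =====
-- transliteration of Source B: count the '1' bits, derive keep_ones, then filter in order
def makeArraySmallerPriorityOne_alt (i : Int) (newArray : List String) : List String :=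
  let ones : Int := newArray.foldl
    (fun n item => if PySem.Str.pyGet? item i = some '1' then n + 1 else n) 0
  let keepOnes : Bool := decide (ones < (newArray.length : Int) - ones)
  newArray.filter (fun item => (decide (PySem.Str.pyGet? item i = some '1')) == keepOnes)

-- ===== PRECONDITION & SPEC =====
-- Pre_ excludes exactly the inputs where Python A raises IndexError: some string too short for index i (Python negative indexing counts from the end)
def Pre_makeArraySmallerPriorityOne (i : Int) (newArray : List String) : Prop :=
  ∀ s ∈ newArray, PySem.Raise.InRange s.toList.length i
instance (i : Int) (newArray : List String) : Decidable (Pre_makeArraySmallerPriorityOne i newArray) := by unfold Pre_makeArraySmallerPriorityOne; infer_instance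
def pvWitness_makeArraySmallerPriorityOne : Int × List String := (1, ["10", "01", "11"])
def Spec_makeArraySmallerPriorityOne (i : Int) (newArray : List String) (out : List String) : Prop := out = makeArraySmallerPriorityOne_alt i newArray
instance (i : Int) (newArray : List String) (out : List String) : Decidable (Spec_makeArraySmallerPriorityOne i newArray out) := by unfold Spec_makeArraySmallerPriorityOne; infer_instance

-- ===== CLAIM (what is proved, stated in full; the proofs are below) =====
def Claim_equal_makeArraySmallerPriorityOne : Prop := ∀ (i : Int) (newArray : List String), Dom_makeArraySmallerPriorityOne i newArray → Pre_makeArraySmallerPriorityOne i newArray → Spec_makeArraySmallerPriorityOne i newArray (makeArraySmallerPriorityOne i newArray)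

-- ===== LEMMAS AND PROOFS =====

-- A's fold, generalized over the accumulator: it appends the two filters and adds the two counts
theorem pvA_fold (i : Int) (l : List String) (os zs : List String) (a b : Int) :
    l.foldl
      (fun (st : List String × List String × Int × Int) item =>
        if PySem.Str.pyGet? item i = some '1' then
          (st.1 ++ [item], st.2.1, st.2.2.1 + 1, st.2.2.2)
        else
          (st.1, st.2.1 ++ [item], st.2.2.1, st.2.2.2 + 1))
      (os, zs, a, b)
    = (os ++ l.filter (fun item => decide (PySem.Str.pyGet? item i = some '1')),
       zs ++ l.filter (fun item => !(decide (PySem.Str.pyGet? item i = some '1'))),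
       a + (l.countP (fun item => decide (PySem.Str.pyGet? item i = some '1')) : Int),
       b + (l.countP (fun item => !(decide (PySem.Str.pyGet? item i = some '1'))) : Int)) := by
  induction l generalizing os zs a b with
  | nil => simp
  | cons x xs ih =>
    rw [List.foldl_cons]
    by_cases h : PySem.Str.pyGet? x i = some '1'
    · rw [if_pos h, ih, List.filter_cons, List.filter_cons, List.countP_cons, List.countP_cons,
        decide_eq_true h]
      simp only [Bool.not_true, if_true, Bool.false_eq_true, if_false]
      refine Prod.ext ?_ (Prod.ext ?_ (Prod.ext ?_ ?_)) <;> simp <;> push_cast <;> ring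
    · rw [if_neg h, ih, List.filter_cons, List.filter_cons, List.countP_cons, List.countP_cons,
        decide_eq_false h]
      simp only [Bool.not_false, if_true, Bool.false_eq_true, if_false]
      refine Prod.ext ?_ (Prod.ext ?_ (Prod.ext ?_ ?_)) <;> simp <;> push_cast <;> ring

-- B's counting fold, generalized over the accumulator
theorem pvB_fold (i : Int) (l : List String) (n : Int) :
    l.foldl (fun n item => if PySem.Str.pyGet? item i = some '1' then n + 1 else n) n
    = n + (l.countP (fun item => decide (PySem.Str.pyGet? item i = some '1')) : Int) := by
  induction l generalizing n with
  | nil => simp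
  | cons x xs ih =>
    rw [List.foldl_cons]
    by_cases h : PySem.Str.pyGet? x i = some '1'
    · rw [if_pos h, ih, List.countP_cons, decide_eq_true h]
      simp only [if_true]
      push_cast; ring
    · rw [if_neg h, ih, List.countP_cons, decide_eq_false h]
      simp

theorem pvCount_split (i : Int) (l : List String) :
    (l.countP (fun item => decide (PySem.Str.pyGet? item i = some '1')))
      + (l.countP (fun item => !(decide (PySem.Str.pyGet? item i = some '1'))))
    = l.length := by
  simpa using List.length_eq_countP_add_countP (l := l)
    (p := fun item => decide (PySem.Str.pyGet? item i = some '1')) |>.symm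

-- ===== VERDICT (by name: the statement is the Claim_ definition above) =====
theorem makeArraySmallerPriorityOne_spec : Claim_equal_makeArraySmallerPriorityOne := by
  intro i newArray _ _
  unfold Spec_makeArraySmallerPriorityOne makeArraySmallerPriorityOne makeArraySmallerPriorityOne_alt
  simp only [pvA_fold, pvB_fold, zero_add]
  have hlen : ((newArray.length : Int)
      - (newArray.countP (fun item => decide (PySem.Str.pyGet? item i = some '1')) : Int))
      = (newArray.countP (fun item => !(decide (PySem.Str.pyGet? item i = some '1'))) : Int) := by
    have := pvCount_split i newArray; omega
  rw [hlen]
  by_cases h : (newArray.countP (fun item => decide (PySem.Str.pyGet? item i = some '1')) : Int)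
      < (newArray.countP (fun item => !(decide (PySem.Str.pyGet? item i = some '1'))) : Int)
  · rw [if_pos h, decide_eq_true h]
    simp
  · rw [if_neg h, decide_eq_false h]
    simp
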